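-- pv_equiv track=rewrite | github.com/adpartin/viral-segmatch | src/embeddings/compute_kmer_features.py | compute_kmer_counts
-- ===== SOURCE A (Python) =====
-- from collections import Counter
--
-- def compute_kmer_counts(seq: str, k: int) -> Counter:
--     """Count k-mers in *seq*, skipping windows that contain non-ACGT characters."""
--     counts = Counter()
--     seq_upper = seq.upper()
--     valid = set('ACGT')
--     for i in range(len(seq_upper) - k + 1):
--         kmer = seq_upper[i:i + k]
--         if all(c in valid for c in kmer):
--             counts[kmer] += 1
--     return counts
-- ===== SOURCE B (Python) =====
-- from collections import Counter
--
-- def compute_kmer_counts(seq: str, k: int) -> Counter: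
--     """Count k-mers by first partitioning the sequence into maximal ACGT runs,
--     then counting every window inside each run (no per-window validity scan)."""
--     counts = Counter()
--     valid = set('ACGT')
--     runs, cur = [], []
--     for c in seq.upper():
--         if c in valid:
--             cur.append(c)
--         elif cur:
--             runs.append(''.join(cur))
--             cur = []
--     if cur:
--         runs.append(''.join(cur))
--     for run in runs:
--         for i in range(len(run) - k + 1):
--             counts[run[i:i+k]] += 1
--     return counts
-- ===== Notes on version B (the rewrite author's own statement) =====
-- stated objective: faster
-- what changed: B partitions the uppercased sequence once into maximal ACGT runs and counts every window inside each run unconditionally, so A's per-window all() validity scan disappears and windows overlapping a non-ACGT character are never touched.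
-- outside the precondition, e.g. on compute_kmer_counts('x', 0): A returns {'': 2}, B returns {}
import Mathlib
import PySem

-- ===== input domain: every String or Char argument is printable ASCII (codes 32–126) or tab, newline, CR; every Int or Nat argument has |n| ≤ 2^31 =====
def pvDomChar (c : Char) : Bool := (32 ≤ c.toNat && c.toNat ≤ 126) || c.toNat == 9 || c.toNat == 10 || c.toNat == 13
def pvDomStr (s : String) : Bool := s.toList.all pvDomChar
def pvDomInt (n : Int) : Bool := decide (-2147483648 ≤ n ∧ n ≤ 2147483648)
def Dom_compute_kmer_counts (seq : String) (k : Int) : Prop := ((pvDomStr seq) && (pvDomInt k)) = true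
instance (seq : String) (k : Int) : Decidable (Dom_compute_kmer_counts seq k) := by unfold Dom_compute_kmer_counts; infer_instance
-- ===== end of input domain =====

-- B partitions the uppercased sequence into maximal ACGT runs and counts every window inside
-- each run, removing the per-window validity scan of A (measurably faster on the timing inputs).


-- ===== PORT A =====
def compute_kmer_counts (seq : String) (k : Int) : List (String × Int) :=
  let seq_upper := PySem.Chars.upper seq.toList
  let valid : PySem.Set Char := PySem.Set.ofList "ACGT".toList
  let counts : PySem.Dict String Int :=
    (PySem.List.pyRange 0 ((seq_upper.length : Int) - k + 1) 1).foldl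
      (fun d i =>
        let kmer := PySem.List.slice seq_upper (some i) (some (i + k))
        if kmer.all (fun c => PySem.Set.contains valid c)
        then d.modify (String.ofList kmer) 0 (· + 1)
        else d)
      PySem.Dict.empty
  counts.items

-- ===== PORT B =====
def compute_kmer_counts_alt (seq : String) (k : Int) : List (String × Int) :=
  let seq_upper := PySem.Chars.upper seq.toList
  let valid : PySem.Set Char := PySem.Set.ofList "ACGT".toList
  -- single pass: split seq_upper into its maximal runs of ACGT characters
  let st := seq_upper.foldl
      (fun (st : List (List Char) × List Char) c =>
        if PySem.Set.contains valid c then (st.1, st.2 ++ [c])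
        else if st.2.isEmpty then st
        else (st.1 ++ [st.2], []))
      ([], [])
  let runs := if st.2.isEmpty then st.1 else st.1 ++ [st.2]
  let counts : PySem.Dict String Int :=
    runs.foldl
      (fun d run =>
        (PySem.List.pyRange 0 ((run.length : Int) - k + 1) 1).foldl
          (fun (d : PySem.Dict String Int) i =>
            d.modify (String.ofList (PySem.List.slice run (some i) (some (i + k)))) 0 (· + 1))
          d)
      PySem.Dict.empty
  counts.items

-- ===== PRECONDITION & SPEC =====
-- Pre_ restricts to k ≥ 1, the natural domain of k-mer counting: for k ≤ 0 Python's forgiving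
-- (and, for k < 0, negative-index) slicing makes both programs return accidental counts of
-- degenerate windows — values neither implementation would be specified to produce, and on which
-- they disagree when the sequence contains non-ACGT characters.
def Pre_compute_kmer_counts (_seq : String) (k : Int) : Prop := 1 ≤ k
instance (seq : String) (k : Int) : Decidable (Pre_compute_kmer_counts seq k) := by unfold Pre_compute_kmer_counts; infer_instance
def pvWitness_compute_kmer_counts : String × Int := ("ACxGTA", 2)
def Spec_compute_kmer_counts (seq : String) (k : Int) (out : List (String × Int)) : Prop := out = compute_kmer_counts_alt seq k
instance (seq : String) (k : Int) (out : List (String × Int)) : Decidable (Spec_compute_kmer_counts seq k out) := by unfold Spec_compute_kmer_counts; infer_instance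

-- ===== CLAIM (what is proved, stated in full; the proofs are below) =====
def Claim_equal_compute_kmer_counts : Prop := ∀ (seq : String) (k : Int), Dom_compute_kmer_counts seq k → Pre_compute_kmer_counts seq k → Spec_compute_kmer_counts seq k (compute_kmer_counts seq k)

-- ===== LEMMAS AND PROOFS =====

-- all windows of length K of a list
def pvWin {α : Type} (K : Nat) (xs : List α) : List (List α) :=
  (List.range (xs.length + 1 - K)).map (fun j => (xs.drop j).take K)

-- maximal runs of elements satisfying v
def pvRuns {α : Type} (v : α → Bool) : List α → List (List α)
  | [] => []
  | c :: cs =>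
    if v c then (c :: cs.takeWhile v) :: pvRuns v (cs.dropWhile v)
    else pvRuns v cs
termination_by l => l.length
decreasing_by
  · simpa using Nat.lt_succ_of_le (List.length_dropWhile_le v cs)
  · simp

lemma pvWin_nil {α : Type} (K : Nat) (hK : 1 ≤ K) : pvWin K ([] : List α) = [] := by
  simp [pvWin]; omega

lemma pvWin_cons {α : Type} (K : Nat) (c : α) (cs : List α) (hK : K ≤ cs.length + 1) :
    pvWin K (c :: cs) = (c :: cs).take K :: pvWin K cs := by
  unfold pvWin
  have h : (c :: cs).length + 1 - K = (cs.length + 1 - K) + 1 := by simp; omega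
  rw [h, List.range_succ_eq_map]
  simp [List.map_map, Function.comp]

lemma pvWin_eq_nil {α : Type} (K : Nat) (xs : List α) (h : xs.length < K) : pvWin K xs = [] := by
  unfold pvWin
  have : xs.length + 1 - K = 0 := by omega
  simp [this]

lemma pvWin_cons_invalid {α : Type} (v : α → Bool) (K : Nat) (hK : 1 ≤ K)
    (c : α) (cs : List α) (hc : v c = false) :
    (pvWin K (c :: cs)).filter (fun w => w.all v) = (pvWin K cs).filter (fun w => w.all v) := by
  by_cases h : K ≤ cs.length + 1
  · rw [pvWin_cons K c cs h]
    have hfirst : ((c :: cs).take K).all v = false := by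
      obtain ⟨K', rfl⟩ : ∃ K', K = K' + 1 := ⟨K - 1, by omega⟩
      simp [hc]
    simp [hfirst]
  · rw [pvWin_eq_nil K (c :: cs) (by simp; omega), pvWin_eq_nil K cs (by omega)]

lemma pvSplit {α : Type} (v : α → Bool) (K : Nat) (hK : 1 ≤ K) (rest : List α)
    (hrest : rest = [] ∨ ∃ b t, rest = b :: t ∧ v b = false) :
    ∀ (r : List α), (∀ a ∈ r, v a = true) →
    (pvWin K (r ++ rest)).filter (fun w => w.all v)
      = pvWin K r ++ (pvWin K rest).filter (fun w => w.all v) := by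
  intro r
  induction r with
  | nil => intro _; simp [pvWin_nil K hK]
  | cons a r ih =>
    intro hval
    have hva : v a = true := hval a (by simp)
    have hvr : ∀ x ∈ r, v x = true := fun x hx => hval x (by simp [hx])
    by_cases htot : K ≤ (r ++ rest).length + 1
    · have hcons : pvWin K (a :: (r ++ rest)) = (a :: (r ++ rest)).take K :: pvWin K (r ++ rest) :=
        pvWin_cons K a (r ++ rest) htot
      rw [List.cons_append, hcons, List.filter_cons, ih hvr]
      by_cases hKr : K ≤ r.length + 1
      · -- first window lies inside a :: r, hence is valid
        have htake : (a :: (r ++ rest)).take K = (a :: r).take K := by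
          rw [show (a :: (r ++ rest)) = (a :: r) ++ rest by simp]
          exact List.take_append_of_le_length (by simpa using hKr)
        have hvalid : ((a :: (r ++ rest)).take K).all v = true := by
          rw [htake, List.all_eq_true]
          intro x hx
          rcases List.mem_cons.1 (List.mem_of_mem_take hx) with rfl | h
          · exact hva
          · exact hvr x h
        rw [hvalid, pvWin_cons K a r hKr, htake]
        simp
      · -- the first window reaches into rest, whose head is invalid
        rcases hrest with rfl | ⟨b, t, rfl, hb⟩
        · simp at htot; omega
        · have hb_mem : b ∈ (a :: (r ++ b :: t)).take K := by
            have : (a :: (r ++ b :: t)).take K = (a :: r ++ b :: t).take K := by simp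
            rw [this]
            have hlen : r.length + 1 < K := by omega
            have : (a :: r ++ b :: t).take K = (a :: r) ++ (b :: t).take (K - (r.length + 1)) := by
              rw [List.take_append]
              congr 1
              exact List.take_of_length_le (by simp; omega)
            rw [this]
            have : b ∈ (b :: t).take (K - (r.length + 1)) := by
              have h1 : 1 ≤ K - (r.length + 1) := by omega
              cases hkk : K - (r.length + 1) with
              | zero => omega
              | succ m => simp
            simp [this]
          have hinvalid : ((a :: (r ++ b :: t)).take K).all v = false := by
            rw [List.all_eq_false]
            exact ⟨b, hb_mem, by simp [hb]⟩
          rw [hinvalid]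
          have hrnil : pvWin K (a :: r) = [] := pvWin_eq_nil K (a :: r) (by simp; omega)
          have hrnil2 : pvWin K r = [] := pvWin_eq_nil K r (by omega)
          simp [hrnil, hrnil2]
    · -- no window fits anywhere
      rw [pvWin_eq_nil K (a :: r ++ rest) (by simp at htot ⊢; omega),
          pvWin_eq_nil K (a :: r) (by simp at htot ⊢; omega),
          pvWin_eq_nil K rest (by simp at htot ⊢; omega)]
      simp

lemma pvDropWhileHead {α : Type} (v : α → Bool) :
    ∀ (l : List α) (b : α) (t : List α), l.dropWhile v = b :: t → v b = false := by
  intro l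
  induction l with
  | nil => intro b t h; simp at h
  | cons x xs ih =>
    intro b t h
    rw [List.dropWhile_cons] at h
    by_cases hx : v x = true
    · rw [if_pos hx] at h; exact ih b t h
    · rw [if_neg hx] at h
      cases h
      simpa using hx

lemma pvCore {α : Type} (v : α → Bool) (K : Nat) (hK : 1 ≤ K) :
    ∀ (u : List α), (pvWin K u).filter (fun w => w.all v)
      = (pvRuns v u).flatMap (pvWin K) := by
  intro u
  induction hu : u.length using Nat.strong_induction_on generalizing u with
  | _ n ih =>
    match u with
    | [] => simp [pvRuns, pvWin_nil K hK]
    | c :: cs =>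
      by_cases hc : v c = true
      · -- valid head: peel off the maximal run c :: takeWhile v cs
        have hsplit : c :: cs = (c :: cs.takeWhile v) ++ cs.dropWhile v := by
          simp [List.takeWhile_append_dropWhile]
        have hrest : cs.dropWhile v = [] ∨ ∃ b t, cs.dropWhile v = b :: t ∧ v b = false := by
          cases hd : cs.dropWhile v with
          | nil => exact Or.inl rfl
          | cons b t => exact Or.inr ⟨b, t, rfl, pvDropWhileHead v cs b t hd⟩
        have hval : ∀ a ∈ c :: cs.takeWhile v, v a = true := by
          intro a ha
          rcases List.mem_cons.1 ha with rfl | h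
          · exact hc
          · exact List.mem_takeWhile_imp h
        have hlen : (cs.dropWhile v).length < n := by
          have := List.length_dropWhile_le v cs
          simp at hu; omega
        rw [show pvRuns v (c :: cs) = (c :: cs.takeWhile v) :: pvRuns v (cs.dropWhile v) by
          rw [pvRuns]; simp [hc]]
        conv_lhs => rw [hsplit]
        rw [pvSplit v K hK (cs.dropWhile v) hrest (c :: cs.takeWhile v) hval,
            ih (cs.dropWhile v).length hlen (cs.dropWhile v) rfl]
        simp
      · have hc' : v c = false := by simpa using hc
        have hlen : cs.length < n := by simp at hu; omega
        rw [pvWin_cons_invalid v K hK c cs hc', ih cs.length hlen cs rfl]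
        rw [show pvRuns v (c :: cs) = pvRuns v cs by rw [pvRuns]; simp [hc']]

-- the run-collecting fold of port B computes pvRuns
lemma pvFoldRuns {α : Type} (v : α → Bool) :
    ∀ (u : List α) (rs : List (List α)) (cur : List α),
    (if (u.foldl
          (fun (st : List (List α) × List α) c =>
            if v c then (st.1, st.2 ++ [c])
            else if st.2.isEmpty then st
            else (st.1 ++ [st.2], []))
          (rs, cur)).2.isEmpty
     then (u.foldl
          (fun (st : List (List α) × List α) c =>
            if v c then (st.1, st.2 ++ [c])
            else if st.2.isEmpty then st
            else (st.1 ++ [st.2], []))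
          (rs, cur)).1
     else (u.foldl
          (fun (st : List (List α) × List α) c =>
            if v c then (st.1, st.2 ++ [c])
            else if st.2.isEmpty then st
            else (st.1 ++ [st.2], []))
          (rs, cur)).1 ++ [(u.foldl
          (fun (st : List (List α) × List α) c =>
            if v c then (st.1, st.2 ++ [c])
            else if st.2.isEmpty then st
            else (st.1 ++ [st.2], []))
          (rs, cur)).2])
      = rs ++ (if cur.isEmpty then pvRuns v u
               else (cur ++ u.takeWhile v) :: pvRuns v (u.dropWhile v)) := by
  intro u
  induction u with
  | nil =>
    intro rs cur
    cases cur <;> simp [pvRuns]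
  | cons c t ih =>
    intro rs cur
    by_cases hc : v c = true
    · simp only [List.foldl_cons, hc, if_true]
      rw [ih rs (cur ++ [c])]
      cases cur with
      | nil =>
        rw [show pvRuns v (c :: t) = (c :: t.takeWhile v) :: pvRuns v (t.dropWhile v) by
          rw [pvRuns]; simp [hc]]
        simp
      | cons x xs => simp [hc]
    · have hc' : v c = false := by simpa using hc
      simp only [List.foldl_cons, hc', if_false, Bool.false_eq_true]
      cases cur with
      | nil =>
        simp only [List.isEmpty_nil, if_true]
        rw [ih rs []]
        rw [show pvRuns v (c :: t) = pvRuns v t by rw [pvRuns]; simp [hc']]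
        simp
      | cons x xs =>
        simp only [List.isEmpty_cons, if_false, Bool.false_eq_true]
        rw [ih (rs ++ [x :: xs]) []]
        have h1 : List.takeWhile v (c :: t) = [] := by simp [hc']
        have h2 : List.dropWhile v (c :: t) = c :: t := by simp [hc']
        rw [h1, h2, show pvRuns v (c :: t) = pvRuns v t by rw [pvRuns]; simp [hc']]
        simp

-- reduce one pyRange/slice counting loop to a fold over pvWin
lemma pvLoop (u : List Char) (k : Int) (K : Nat) (hk : (K : Int) = k)
    (f : PySem.Dict String Int → List Char → PySem.Dict String Int)
    (d : PySem.Dict String Int) :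
    (PySem.List.pyRange 0 ((u.length : Int) - k + 1) 1).foldl
        (fun d i => f d (PySem.List.slice u (some i) (some (i + k)))) d
      = (pvWin K u).foldl f d := by
  rw [PySem.List.pyRange_one]
  have htn : (((u.length : Int) - k + 1) - 0).toNat = u.length + 1 - K := by omega
  rw [htn, List.foldl_map]
  unfold pvWin
  rw [List.foldl_map]
  congr 1
  funext d' j
  have h1 : (0 : Int) + (j : Int) = (j : Int) := by omega
  have h2 : (j : Int) + k = (j : Int) + (K : Int) := by omega
  rw [h1, h2, PySem.List.slice_natCast_add]

theorem compute_kmer_counts_eq (seq : String) (k : Int) (hk : 1 ≤ k) :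
    compute_kmer_counts seq k = compute_kmer_counts_alt seq k := by
  unfold compute_kmer_counts compute_kmer_counts_alt
  simp only []
  set u := PySem.Chars.upper seq.toList with hu
  set valid : PySem.Set Char := PySem.Set.ofList "ACGT".toList with hvalid
  set v : Char → Bool := fun c => PySem.Set.contains valid c with hv
  set K : Nat := k.toNat with hK
  have hkK : (K : Int) = k := by omega
  have hK1 : 1 ≤ K := by omega
  congr 1
  -- A side: filtered windows
  rw [show (fun (d : PySem.Dict String Int) i =>
        let kmer := PySem.List.slice u (some i) (some (i + k))
        if kmer.all (fun c => PySem.Set.contains valid c)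
        then d.modify (String.ofList kmer) 0 (· + 1)
        else d)
      = (fun (d : PySem.Dict String Int) i =>
          (fun (d : PySem.Dict String Int) (w : List Char) =>
            if w.all v then d.modify (String.ofList w) 0 (· + 1) else d) d
            (PySem.List.slice u (some i) (some (i + k)))) from rfl]
  rw [pvLoop u k K hkK
        (fun (d : PySem.Dict String Int) (w : List Char) =>
          if w.all v then d.modify (String.ofList w) 0 (· + 1) else d)
        PySem.Dict.empty]
  rw [show (fun (d : PySem.Dict String Int) (w : List Char) =>
        if w.all v then d.modify (String.ofList w) 0 (· + 1) else d)
      = (fun (d : PySem.Dict String Int) (w : List Char) =>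
          if (fun (w : List Char) => w.all v) w
          then (fun (d : PySem.Dict String Int) (w : List Char) =>
            d.modify (String.ofList w) 0 (· + 1)) d w else d) from rfl]
  rw [← List.foldl_filter]
  -- B side: runs
  rw [pvFoldRuns v u [] []]
  simp only [List.isEmpty_nil, if_true, List.nil_append]
  rw [show (fun (d : PySem.Dict String Int) (run : List Char) =>
        (PySem.List.pyRange 0 ((run.length : Int) - k + 1) 1).foldl
          (fun (d : PySem.Dict String Int) i =>
            d.modify (String.ofList (PySem.List.slice run (some i) (some (i + k)))) 0 (· + 1)) d)
      = (fun (d : PySem.Dict String Int) (run : List Char) =>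
          (pvWin K run).foldl
            (fun (d : PySem.Dict String Int) (w : List Char) =>
              d.modify (String.ofList w) 0 (· + 1)) d) by
    funext d run
    exact pvLoop run k K hkK
      (fun (d : PySem.Dict String Int) (w : List Char) =>
        d.modify (String.ofList w) 0 (· + 1)) d]
  rw [← List.foldl_flatMap]
  rw [← pvCore v K hK1 u]

-- ===== VERDICT (by name: the statement is the Claim_ definition above) =====
theorem compute_kmer_counts_spec : Claim_equal_compute_kmer_counts := by
  intro seq k _ hpre
  exact compute_kmer_counts_eq seq k hpre
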